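-- pv_equiv track=rewrite | github.com/artempenteskul/tasks | other/python/digrams.py | solution
-- ===== SOURCE A (Python) =====
-- def solution(s):
--     results = []
--     init_digrams = {}
--     for letter_index, letter in enumerate(s):
--         if letter_index + 1 < len(s):
--             current_digram = f'{letter}{s[letter_index+1]}'
--             if current_digram in init_digrams:
--                 results.append(letter_index - init_digrams[current_digram])
--             else:
--                 init_digrams[current_digram] = letter_index
--
--     return max(results) if results else -1
-- ===== SOURCE B (Python) =====
-- def solution(s):
--     # table pass: first and last index of every digram
--     first = {}
--     last = {}
--     for i in range(len(s) - 1):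
--         key = f'{s[i]}{s[i+1]}'
--         if key not in first:
--             first[key] = i
--         last[key] = i
--     # reduce pass: widest first-to-last gap among repeated digrams
--     best = -1
--     for key, f in first.items():
--         l = last[key]
--         if l != f:
--             best = max(best, l - f)
--     return best
-- ===== Notes on version B (the rewrite author's own statement) =====
-- stated objective: alternative
-- what changed: A keeps one first-occurrence dict and appends a gap to a results list at every repeat, then takes max(results); B builds a first/last index table per digram in one pass and then reduces over the table, taking max(last-first) over digrams occurring at least twice.
import Mathlib
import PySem

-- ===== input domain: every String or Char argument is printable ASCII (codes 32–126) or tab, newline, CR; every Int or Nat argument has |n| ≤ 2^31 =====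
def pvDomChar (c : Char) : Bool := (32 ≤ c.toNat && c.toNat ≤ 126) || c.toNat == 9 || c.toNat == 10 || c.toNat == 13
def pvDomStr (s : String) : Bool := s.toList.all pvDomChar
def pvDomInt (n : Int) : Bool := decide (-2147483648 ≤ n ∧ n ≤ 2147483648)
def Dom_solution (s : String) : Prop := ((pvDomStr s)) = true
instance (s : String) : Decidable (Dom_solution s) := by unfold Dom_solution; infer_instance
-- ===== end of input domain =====

-- B replaces A's append-a-gap-per-repeat loop + max(results) by a first/last index table per
-- digram built in one pass and a separate reduce over that table (alternative decomposition, same cost).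


-- ===== PORT A =====
-- literal transliteration of A: one dict of first indices, a results list of gaps, max(results) or -1
def solution (s : String) : Int :=
  let cs := s.toList
  let st :=
    (PySem.List.enumerate cs).foldl
      (fun (st : List Int × PySem.Dict String Int) p =>
        if p.1 + 1 < PySem.Str.len s then
          -- s[letter_index+1]: the guard keeps the index in range, so the default ' ' is unreachable
          let d := String.mk [p.2, PySem.List.pyGetD cs (p.1 + 1) ' ']
          match st.2.get? d with
          | some f => (st.1 ++ [p.1 - f], st.2)
          | none   => (st.1, st.2.insert d p.1)
        else st)
      (([], PySem.Dict.empty) : List Int × PySem.Dict String Int)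
  match PySem.List.max? st.1 (fun y => y) with
  | some m => m
  | none   => -1

-- ===== PORT B =====
-- literal transliteration of B (Source B): first/last table pass, then a reduce over first.items()
def solution_alt (s : String) : Int :=
  let cs := s.toList
  let fl :=
    (PySem.List.pyRange 0 (PySem.Str.len s - 1)).foldl
      (fun (fl : PySem.Dict String Int × PySem.Dict String Int) i =>
        -- s[i], s[i+1]: i ranges over 0 .. len(s)-2, so the default ' ' is unreachable
        let key := String.mk [PySem.List.pyGetD cs i ' ', PySem.List.pyGetD cs (i + 1) ' ']
        let first := if fl.1.contains key then fl.1 else fl.1.insert key i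
        (first, fl.2.insert key i))
      ((PySem.Dict.empty, PySem.Dict.empty) : PySem.Dict String Int × PySem.Dict String Int)
  fl.1.items.foldl
    (fun best kf =>
      if fl.2.getD kf.1 0 ≠ kf.2 then max best (fl.2.getD kf.1 0 - kf.2) else best)
    (-1)

-- ===== PRECONDITION & SPEC =====
def Spec_solution (s : String) (out : Int) : Prop := out = solution_alt s
instance (s : String) (out : Int) : Decidable (Spec_solution s out) := by unfold Spec_solution; infer_instance

-- ===== CLAIM (what is proved, stated in full; the proofs are below) =====
def Claim_equal_solution : Prop := ∀ (s : String), Dom_solution s → Spec_solution s (solution s)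

-- ===== LEMMAS AND PROOFS =====

-- the digram key f'{s[i]}{s[i+1]}' at index i
def digKey (cs : List Char) (i : Int) : String :=
  String.mk [PySem.List.pyGetD cs i ' ', PySem.List.pyGetD cs (i + 1) ' ']

-- A's loop body, freed of the range guard
def stepA (cs : List Char) (st : List Int × PySem.Dict String Int) (i : Int) :
    List Int × PySem.Dict String Int :=
  match st.2.get? (digKey cs i) with
  | some f => (st.1 ++ [i - f], st.2)
  | none   => (st.1, st.2.insert (digKey cs i) i)

-- B's table-pass body
def stepB (cs : List Char) (fl : PySem.Dict String Int × PySem.Dict String Int) (i : Int) :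
    PySem.Dict String Int × PySem.Dict String Int :=
  ((if fl.1.contains (digKey cs i) then fl.1 else fl.1.insert (digKey cs i) i),
   fl.2.insert (digKey cs i) i)

def reduceB (F L : PySem.Dict String Int) : Int :=
  F.items.foldl
    (fun best kf => if L.getD kf.1 0 ≠ kf.2 then max best (L.getD kf.1 0 - kf.2) else best)
    (-1)
def gEnt (L : PySem.Dict String Int) (kf : String × Int) : Int :=
  if L.getD kf.1 0 ≠ kf.2 then L.getD kf.1 0 - kf.2 else -1

lemma foldl_max_pull {α : Type} (g : α → Int) (l : List α) :
    ∀ (init x : Int),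
      l.foldl (fun b y => max b (g y)) (max init x) = max (l.foldl (fun b y => max b (g y)) init) x := by
  induction l with
  | nil => intro init x; rfl
  | cons a t ih =>
      intro init x
      simp only [List.foldl_cons]
      rw [max_right_comm init x (g a), ih]

lemma foldl_reduce_eq_max (L : PySem.Dict String Int) (l : List (String × Int)) :
    ∀ (init : Int), -1 ≤ init →
      l.foldl (fun best kf => if L.getD kf.1 0 ≠ kf.2 then max best (L.getD kf.1 0 - kf.2) else best) init
        = l.foldl (fun b kf => max b (gEnt L kf)) init := by
  induction l with
  | nil => intro init _; rfl
  | cons a t ih =>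
      intro init hinit
      simp only [List.foldl_cons, gEnt]
      split_ifs with h
      · exact ih _ (le_trans hinit (le_max_left _ _))
      · rw [max_eq_left hinit]; exact ih _ hinit

lemma reduceB_eq_max (F L : PySem.Dict String Int) :
    reduceB F L = F.items.foldl (fun b kf => max b (gEnt L kf)) (-1) := by
  exact foldl_reduce_eq_max L F.items (-1) le_rfl

lemma gEnt_insert_of_ne (L : PySem.Dict String Int) (k : String) (i : Int)
    (kf : String × Int) (h : kf.1 ≠ k) : gEnt (L.insert k i) kf = gEnt L kf := by
  simp only [gEnt, PySem.Dict.getD_insert_of_ne L i 0 h]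

lemma foldl_gEnt_insert_congr (L : PySem.Dict String Int) (k : String) (i : Int)
    (ll : List (String × Int)) (hll : ∀ kf ∈ ll, kf.1 ≠ k) (init : Int) :
    ll.foldl (fun b kf => max b (gEnt (L.insert k i) kf)) init
      = ll.foldl (fun b kf => max b (gEnt L kf)) init := by
  exact PySem.List.foldl_congr_mem _ _ _ _ (fun acc x hx => by
    rw [gEnt_insert_of_ne L k i x (hll x hx)])

-- case: fresh digram — both tables gain the key, the reduce value is unchanged
lemma reduceB_insert_fresh (F L : PySem.Dict String Int) (k : String) (i : Int)
    (hF : F.contains k = false) (hL : L.contains k = false) :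
    reduceB (F.insert k i) (L.insert k i) = reduceB F L := by
  rw [reduceB_eq_max, reduceB_eq_max,
      PySem.Dict.items_insert_of_not_contains F i hF, List.foldl_append]
  have hne : ∀ kf ∈ F.items, kf.1 ≠ k := by
    intro kf hkf heq
    have hmem : k ∈ F.keys := heq ▸ PySem.Dict.mem_keys_of_mem_items F hkf
    rw [← PySem.Dict.contains_iff_mem_keys] at hmem
    simp [hF] at hmem
  rw [foldl_gEnt_insert_congr L k i F.items hne]
  have hg : gEnt (L.insert k i) (k, i) = -1 := by
    simp only [gEnt, PySem.Dict.getD_insert_self]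
    simp
  simp only [List.foldl_cons, List.foldl_nil]
  rw [hg]
  exact max_eq_left (PySem.List.le_foldl_max_int F.items (gEnt L) (-1)).1

-- case: repeated digram — only `last[k]` moves up, the reduce takes the new, larger gap
lemma reduceB_insert_repeat (F L : PySem.Dict String Int) (k : String) (f l i : Int)
    (hnd : F.keys.Nodup) (hF : F.get? k = some f) (hL : L.get? k = some l)
    (hfl : f ≤ l) (hli : l < i) :
    reduceB F (L.insert k i) = max (reduceB F L) (i - f) := by
  rw [reduceB_eq_max, reduceB_eq_max]
  obtain ⟨l1, l2, hitems⟩ := List.append_of_mem (PySem.Dict.mem_items_of_get?_eq_some F hF)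
  have hndk : (List.map Prod.fst l1 ++ k :: List.map Prod.fst l2).Nodup := by
    have hk : F.keys = F.items.map Prod.fst := by simp only [PySem.Dict.keys]
    rw [hk, hitems] at hnd
    simpa using hnd
  have hk1 : k ∉ List.map Prod.fst l1 := by
    intro h
    exact (List.disjoint_of_nodup_append hndk) h List.mem_cons_self
  have hk2 : k ∉ List.map Prod.fst l2 :=
    (List.nodup_cons.1 ((List.nodup_append.1 hndk).2.1)).1
  have hl1 : ∀ kf ∈ l1, kf.1 ≠ k := by
    intro kf h heq; exact hk1 (heq ▸ List.mem_map_of_mem h)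
  have hl2 : ∀ kf ∈ l2, kf.1 ≠ k := by
    intro kf h heq; exact hk2 (heq ▸ List.mem_map_of_mem h)
  rw [hitems, List.foldl_append, List.foldl_append, List.foldl_cons, List.foldl_cons,
      foldl_gEnt_insert_congr L k i l1 hl1]
  have hgnew : gEnt (L.insert k i) (k, f) = i - f := by
    simp only [gEnt, PySem.Dict.getD_insert_self]
    rw [if_pos (by omega)]
  have hgold : gEnt L (k, f) ≤ i - f := by
    simp only [gEnt, PySem.Dict.getD_of_get?_eq_some L 0 hL]
    split_ifs <;> omega
  rw [hgnew]
  rw [foldl_max_pull, foldl_max_pull, foldl_gEnt_insert_congr L k i l2 hl2]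
  rw [max_assoc, max_eq_right hgold]


lemma main_inv (cs : List Char) (m : Nat) :
    (((PySem.List.pyRange 0 (m : Int)).foldl (stepA cs) ([], PySem.Dict.empty)).2
        = ((PySem.List.pyRange 0 (m : Int)).foldl (stepB cs) (PySem.Dict.empty, PySem.Dict.empty)).1)
    ∧ (((PySem.List.pyRange 0 (m : Int)).foldl (stepA cs) ([], PySem.Dict.empty)).2.keys.Nodup)
    ∧ (((PySem.List.pyRange 0 (m : Int)).foldl (stepA cs) ([], PySem.Dict.empty)).2.keys
        = ((PySem.List.pyRange 0 (m : Int)).foldl (stepB cs) (PySem.Dict.empty, PySem.Dict.empty)).2.keys)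
    ∧ (∀ k f, ((PySem.List.pyRange 0 (m : Int)).foldl (stepA cs) ([], PySem.Dict.empty)).2.get? k = some f →
        ∃ l, ((PySem.List.pyRange 0 (m : Int)).foldl (stepB cs) (PySem.Dict.empty, PySem.Dict.empty)).2.get? k = some l
          ∧ f ≤ l ∧ l < (m : Int))
    ∧ (((PySem.List.pyRange 0 (m : Int)).foldl (stepA cs) ([], PySem.Dict.empty)).1.foldl max (-1)
        = reduceB ((PySem.List.pyRange 0 (m : Int)).foldl (stepB cs) (PySem.Dict.empty, PySem.Dict.empty)).1
                  ((PySem.List.pyRange 0 (m : Int)).foldl (stepB cs) (PySem.Dict.empty, PySem.Dict.empty)).2)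
    ∧ (∀ x ∈ ((PySem.List.pyRange 0 (m : Int)).foldl (stepA cs) ([], PySem.Dict.empty)).1, (0 : Int) ≤ x) := by
  induction m with
  | zero =>
      refine ⟨rfl, PySem.Dict.nodup_keys_empty, rfl, ?_, rfl, ?_⟩
      · intro k f h
        rw [show (PySem.List.pyRange 0 ((0:Nat) : Int)) = [] from rfl] at h
        simp only [List.foldl_nil] at h
        exact absurd h (by simp [PySem.Dict.get?_empty])
      · intro x hx
        rw [show (PySem.List.pyRange 0 ((0:Nat) : Int)) = [] from rfl] at hx
        simp at hx
  | succ m ih =>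
      obtain ⟨h1, h2, h3, h4, h5, h6⟩ := ih
      have hcast : (((m + 1 : Nat)) : Int) = (m : Int) + 1 := by push_cast; ring
      rw [hcast, PySem.List.pyRange_one_succ_right (by positivity)]
      simp only [List.foldl_append, List.foldl_cons, List.foldl_nil]
      set SA := (PySem.List.pyRange 0 (m : Int)).foldl (stepA cs) ([], PySem.Dict.empty) with hSA
      set SB := (PySem.List.pyRange 0 (m : Int)).foldl (stepB cs) (PySem.Dict.empty, PySem.Dict.empty) with hSB
      set k := digKey cs (m : Int) with hk
      cases hget : SA.2.get? k with
      | none =>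
          have hcontA : SA.2.contains k = false := (PySem.Dict.get?_eq_none_iff_contains SA.2 k).1 hget
          have hcontB1 : SB.1.contains k = false := h1 ▸ hcontA
          have hkeyB : k ∉ SB.2.keys := by
            rw [← h3]
            intro hmem
            rw [← PySem.Dict.contains_iff_mem_keys] at hmem
            simp [hcontA] at hmem
          have hcontB2 : SB.2.contains k = false := by
            rw [← Bool.not_eq_true]
            rw [PySem.Dict.contains_iff_mem_keys]
            exact hkeyB
          have hA : stepA cs SA (m : Int) = (SA.1, SA.2.insert k (m : Int)) := by
            simp only [stepA, ← hk, hget]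
          have hB : stepB cs SB (m : Int) = (SB.1.insert k (m : Int), SB.2.insert k (m : Int)) := by
            simp only [stepB, ← hk, hcontB1, Bool.false_eq_true, if_false]
          rw [hA, hB]
          refine ⟨by simpa using congrArg (fun d => d.insert k (m : Int)) h1, ?_, ?_, ?_, ?_, h6⟩
          · -- Nodup keys after fresh insert
            rw [PySem.Dict.keys_insert_of_not_contains SA.2 (m : Int) hcontA]
            have hknot : k ∉ SA.2.keys := by
              intro hmem
              rw [← PySem.Dict.contains_iff_mem_keys] at hmem
              rw [hcontA] at hmem; cases hmem
            exact List.nodup_append.2 ⟨h2, List.nodup_singleton k, by intro a ha b hb hab; rw [List.mem_singleton] at hb; exact hknot ((hab.trans hb) ▸ ha)⟩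
          · rw [PySem.Dict.keys_insert_of_not_contains SA.2 (m : Int) hcontA,
                PySem.Dict.keys_insert_of_not_contains SB.2 (m : Int) hcontB2, h3]
          · intro k' f h
            rw [PySem.Dict.get?_insert] at h ⊢
            by_cases hkk : k' = k
            · rw [if_pos hkk] at h ⊢
              cases h
              exact ⟨(m : Int), rfl, le_refl _, by omega⟩
            · rw [if_neg hkk] at h ⊢
              obtain ⟨l, hl, hfl, hlm⟩ := h4 k' f h
              exact ⟨l, hl, hfl, by omega⟩
          · rw [h1, reduceB_insert_fresh SB.1 SB.2 k (m : Int) hcontB1 hcontB2]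
            exact h5
      | some f =>
          have hcontA : SA.2.contains k = true := by
            rw [PySem.Dict.contains_eq_isSome_get?, hget]; rfl
          have hcontB1 : SB.1.contains k = true := h1 ▸ hcontA
          obtain ⟨l, hl, hfl, hlm⟩ := h4 k f hget
          have hA : stepA cs SA (m : Int) = (SA.1 ++ [(m : Int) - f], SA.2) := by
            simp only [stepA, ← hk, hget]
          have hB : stepB cs SB (m : Int) = (SB.1, SB.2.insert k (m : Int)) := by
            simp only [stepB, ← hk, hcontB1, if_true]
          rw [hA, hB]
          refine ⟨h1, h2, ?_, ?_, ?_, ?_⟩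
          · rw [PySem.Dict.keys_insert_of_contains SB.2 (m : Int) (by
              rw [PySem.Dict.contains_iff_mem_keys, ← h3, ← PySem.Dict.contains_iff_mem_keys]
              exact hcontA)]
            exact h3
          · intro k' f' h
            rw [PySem.Dict.get?_insert]
            by_cases hkk : k' = k
            · subst hkk
              rw [hget] at h; cases h
              rw [if_pos rfl]
              exact ⟨(m : Int), rfl, by omega, by omega⟩
            · rw [if_neg hkk]
              obtain ⟨l', hl', hfl', hlm'⟩ := h4 k' f' h
              exact ⟨l', hl', hfl', by omega⟩
          · rw [List.foldl_append, List.foldl_cons, List.foldl_nil]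
            rw [h5, ← h1, reduceB_insert_repeat SA.2 SB.2 k f l (m : Int) h2 hget hl hfl hlm, h1]
          · intro x hx
            rcases List.mem_append.1 hx with h | h
            · exact h6 x h
            · simp at h
              subst h
              have : f ≤ l := hfl
              omega

-- A's program, with the enumerate loop and its range guard folded into stepA over 0 .. len-2
lemma solution_eq_fold (s : String) :
    solution s =
      (match PySem.List.max?
          (((PySem.List.pyRange 0 (PySem.Str.len s - 1)).foldl (stepA s.toList)
              ([], PySem.Dict.empty)).1) (fun y => y) with
       | some m => m
       | none => -1) := by
  show (match PySem.List.max?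
      ((PySem.List.enumerate s.toList).foldl
        (fun (st : List Int × PySem.Dict String Int) p =>
          if p.1 + 1 < PySem.Str.len s then
            let d := String.mk [p.2, PySem.List.pyGetD s.toList (p.1 + 1) ' ']
            match st.2.get? d with
            | some f => (st.1 ++ [p.1 - f], st.2)
            | none   => (st.1, st.2.insert d p.1)
          else st)
        ([], PySem.Dict.empty)).1 (fun y => y) with
    | some m => m
    | none   => -1) = _
  rw [PySem.List.enumerate_eq_map_pyRange s.toList ' ', List.foldl_map]
  have hlen : PySem.List.len s.toList = PySem.Str.len s := by
    simp [PySem.List.len_eq, PySem.Str.len_eq]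
  rw [hlen]
  set n := PySem.Str.len s with hn
  have hn0 : 0 ≤ n := by rw [hn, PySem.Str.len_eq]; positivity
  rcases eq_or_lt_of_le hn0 with h0 | hpos
  · rw [← h0]
    norm_num [PySem.List.pyRange_one_eq_nil]
  · rw [PySem.List.pyRange_one_append 0 (n - 1) n (by omega) (by omega), List.foldl_append]
    have hlast : PySem.List.pyRange (n - 1) n = [n - 1] := by
      rw [show n = n - 1 + 1 by ring]
      simpa using PySem.List.pyRange_one_singleton (n - 1)
    rw [hlast]
    have hguard : ¬ (n - 1 + 1 < n) := by omega
    simp only [List.foldl_cons, List.foldl_nil, if_neg hguard]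
    rw [PySem.List.foldl_congr_mem]
    intro acc x hx
    rw [PySem.List.mem_pyRange_one] at hx
    rw [if_pos (by omega)]
    rfl

-- B's program is exactly the stepB table pass followed by the reduceB pass
lemma solution_alt_eq_fold (s : String) :
    solution_alt s =
      reduceB (((PySem.List.pyRange 0 (PySem.Str.len s - 1)).foldl (stepB s.toList)
                  (PySem.Dict.empty, PySem.Dict.empty)).1)
              (((PySem.List.pyRange 0 (PySem.Str.len s - 1)).foldl (stepB s.toList)
                  (PySem.Dict.empty, PySem.Dict.empty)).2) := by
  rfl

-- ===== VERDICT (by name: the statement is the Claim_ definition above) =====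
theorem solution_spec : Claim_equal_solution := by
  unfold Claim_equal_solution
  intro s _
  unfold Spec_solution
  rw [solution_eq_fold s, solution_alt_eq_fold s]
  set n := PySem.Str.len s with hn
  have hn0 : 0 ≤ n := by rw [hn, PySem.Str.len_eq]; positivity
  have hr : PySem.List.pyRange 0 (n - 1) = PySem.List.pyRange 0 (((n - 1).toNat : Nat) : Int) := by
    by_cases h : 1 ≤ n
    · congr 1; omega
    · rw [PySem.List.pyRange_one_eq_nil (by omega), PySem.List.pyRange_one_eq_nil (by omega)]
  rw [hr]
  obtain ⟨h1, h2, h3, h4, h5, h6⟩ := main_inv s.toList (n - 1).toNat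
  rw [← h5]
  cases hR : (((PySem.List.pyRange 0 (((n - 1).toNat : Nat) : Int)).foldl (stepA s.toList)
      ([], PySem.Dict.empty)).1) with
  | nil => rfl
  | cons x t =>
      rw [PySem.List.max?_id_cons]
      simp only [List.foldl_cons]
      rw [max_eq_right (le_trans (by norm_num) (h6 x (hR ▸ List.mem_cons_self)))]
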